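-- pv_equiv track=rewrite | github.com/V1perZerofy/BWINF-42 | Stadtführung.py | checkForNewStart
-- ===== SOURCE A (Python) =====
-- def checkForNewStart(stopList):
--     frontStops, backStops = [], []
--     mostSavedDistance = -1
--
--     if (stopList[0][2] != "X"):
--         for stop in stopList:
--             if(stop[2] == "X"):
--                 break
--             frontStops.append(stop)
--         for stop in reversed(stopList):
--             if(stop[2] == "X"):
--                 break
--             backStops.append(stop)
--
--         return frontStops, backStops
--     return frontStops, backStops
-- ===== SOURCE B (Python) =====
-- def checkForNewStart(stopList):
--     if stopList[0][2] == "X":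
--         return [], []
--     frontStops, run = [], []
--     collecting = True
--     for stop in stopList:
--         if stop[2] == "X":
--             collecting = False
--             run = []
--         else:
--             if collecting:
--                 frontStops.append(stop)
--             run.append(stop)
--     return frontStops, list(reversed(run))
-- ===== Notes on version B (the rewrite author's own statement) =====
-- stated objective: alternative
-- what changed: B makes a SINGLE forward pass maintaining a 'collecting' flag for the prefix and a run-since-last-'X' accumulator (reset on each 'X') whose reversal is the back list, instead of A's two directional break-loops (one over the list, one over its reversal).
-- outside the precondition, e.g. on checkForNewStart([['a', 'b', 'X'], ['c']]): A returns ([], []), B returns ([], [])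
import Mathlib
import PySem

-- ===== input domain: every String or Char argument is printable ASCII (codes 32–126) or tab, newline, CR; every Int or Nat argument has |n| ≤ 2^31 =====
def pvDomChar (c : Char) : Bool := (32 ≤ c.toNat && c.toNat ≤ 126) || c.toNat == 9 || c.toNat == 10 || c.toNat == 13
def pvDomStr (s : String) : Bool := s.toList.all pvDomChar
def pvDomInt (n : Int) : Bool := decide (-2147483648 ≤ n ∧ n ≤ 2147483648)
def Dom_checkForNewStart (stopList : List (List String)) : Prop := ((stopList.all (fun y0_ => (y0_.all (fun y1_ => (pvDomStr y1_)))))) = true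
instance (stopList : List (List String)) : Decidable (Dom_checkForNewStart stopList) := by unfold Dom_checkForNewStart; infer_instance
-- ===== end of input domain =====

-- B replaces A's two directional break-loops by ONE forward pass with a collecting flag and a
-- run-since-last-'X' accumulator; objective: alternative (same cost, different traversal).


-- stop[2] == "X" (pyGetD only reached inside Pre_, where every row has ≥ 3 fields)
def pvIsX (s : List String) : Bool := (PySem.List.pyGet? s 2).getD "" == "X"

-- ===== PORT A =====
-- one break-loop of A: append stops until one with stop[2] == "X"
def pvScanA (xs : List (List String)) : List (List String) :=
  match xs with
  | [] => []
  | stop :: rest => if pvIsX stop then [] else stop :: pvScanA rest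

def checkForNewStart (stopList : List (List String)) : List (List String) × List (List String) :=
  if (PySem.List.pyGet? ((PySem.List.pyGet? stopList 0).getD []) 2).getD "" ≠ "X" then
    (pvScanA stopList, pvScanA stopList.reverse)
  else ([], [])

-- ===== PORT B =====
-- one step of B's single forward loop; state = (frontStops, run, collecting)
def pvStepB (st : List (List String) × List (List String) × Bool) (stop : List String) :
    List (List String) × List (List String) × Bool :=
  if pvIsX stop then (st.1, [], false)
  else ((if st.2.2 then st.1 ++ [stop] else st.1), st.2.1 ++ [stop], st.2.2)

def checkForNewStart_alt (stopList : List (List String)) : List (List String) × List (List String) :=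
  if (PySem.List.pyGet? ((PySem.List.pyGet? stopList 0).getD []) 2).getD "" == "X" then ([], [])
  else
    let r := stopList.foldl pvStepB ([], [], true)
    (r.1, r.2.1.reverse)

-- ===== PRECONDITION & SPEC =====
-- Pre_ excludes the empty list (A raises IndexError on stopList[0]) and lists containing a row with
-- fewer than 3 fields — outside the function's natural domain of stop records; on some of those A
-- raises IndexError, on others (a short row hidden behind an 'X' row) A happens to return normally.
def Pre_checkForNewStart (stopList : List (List String)) : Prop :=
  stopList ≠ [] ∧ ∀ row ∈ stopList, 3 ≤ row.length
instance (stopList : List (List String)) : Decidable (Pre_checkForNewStart stopList) := by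
  unfold Pre_checkForNewStart; infer_instance

def pvWitness_checkForNewStart : List (List String) := [["a", "b", "c"], ["d", "e", "X"]]

def Spec_checkForNewStart (stopList : List (List String)) (out : List (List String) × List (List String)) : Prop := out = checkForNewStart_alt stopList
instance (stopList : List (List String)) (out : List (List String) × List (List String)) : Decidable (Spec_checkForNewStart stopList out) := by unfold Spec_checkForNewStart; infer_instance

-- ===== CLAIM (what is proved, stated in full; the proofs are below) =====
def Claim_equal_checkForNewStart : Prop := ∀ (stopList : List (List String)), Dom_checkForNewStart stopList → Pre_checkForNewStart stopList → Spec_checkForNewStart stopList (checkForNewStart stopList)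

-- ===== LEMMAS AND PROOFS =====

-- A's break-loop is takeWhile
theorem pvScanA_eq_takeWhile (xs : List (List String)) :
    pvScanA xs = xs.takeWhile (fun s => !pvIsX s) := by
  induction xs with
  | nil => rfl
  | cons a t ih =>
    simp only [pvScanA, List.takeWhile_cons]
    by_cases h : pvIsX a <;> simp [h, ih]

-- the front component of B's fold: everything before the first 'X' (once collecting is off, frozen)
theorem foldB_fst (xs : List (List String)) (f b : List (List String)) (c : Bool) :
    (xs.foldl pvStepB (f, b, c)).1 = f ++ (if c then xs.takeWhile (fun s => !pvIsX s) else []) := by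
  induction xs generalizing f b c with
  | nil => simp
  | cons a t ih =>
    simp only [List.foldl_cons, pvStepB, List.takeWhile_cons]
    by_cases h : pvIsX a
    · simp [h, ih]
    · cases c <;> simp [h, ih]

-- the run component of B's fold: the suffix after the last 'X' (plus the seed if no 'X' occurs)
theorem foldB_snd (xs : List (List String)) (f b : List (List String)) (c : Bool) :
    (xs.foldl pvStepB (f, b, c)).2.1 =
      (if xs.any pvIsX then [] else b) ++ (xs.reverse.takeWhile (fun s => !pvIsX s)).reverse := by
  induction xs using List.reverseRecOn generalizing f b c with
  | nil => simp
  | append_singleton ys x ih =>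
    rw [List.foldl_append]
    rcases h : ys.foldl pvStepB (f, b, c) with ⟨f', b', c'⟩
    have hb' : b' = (if ys.any pvIsX then [] else b) ++
        (ys.reverse.takeWhile (fun s => !pvIsX s)).reverse := by
      have := ih f b c; rw [h] at this; simpa using this
    simp only [List.foldl_cons, List.foldl_nil, pvStepB, List.reverse_append,
      List.reverse_singleton, List.singleton_append, List.takeWhile_cons, List.any_append]
    by_cases hx : pvIsX x
    · simp [hx]
    · simp [hx, hb']

theorem checkForNewStart_spec' (stopList : List (List String)) :
    checkForNewStart stopList = checkForNewStart_alt stopList := by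
  unfold checkForNewStart checkForNewStart_alt
  by_cases hg : (PySem.List.pyGet? ((PySem.List.pyGet? stopList 0).getD []) 2).getD "" = "X"
  · simp [hg]
  · simp only [hg, ne_eq, not_false_eq_true, if_true, beq_iff_eq, if_false, Prod.mk.injEq]
    refine ⟨?_, ?_⟩
    · rw [foldB_fst, pvScanA_eq_takeWhile]; simp
    · rw [foldB_snd, pvScanA_eq_takeWhile]
      simp [ite_self]

-- ===== VERDICT (by name: the statement is the Claim_ definition above) =====
theorem checkForNewStart_spec : Claim_equal_checkForNewStart := by
  intro stopList _ _
  exact checkForNewStart_spec' stopList
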